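-- pv_equiv track=rewrite | github.com/one-thread/plc_transition_sequence_identification | io_signal_analyse/align/align_transition.py | partition_transitions
-- ===== SOURCE A (Python) =====
-- def partition_transitions(sequence, start_transitions):
--     partitions = []
--     current_partition = []
--
--     for transition in sequence:
--         if transition in start_transitions and current_partition:
--             partitions.append(current_partition)
--             current_partition = []
--
--         current_partition.append(transition)
--
--     # 添加最后一个划分
--     if current_partition:
--         partitions.append(current_partition)
--
--     return partitions
-- ===== SOURCE B (Python) =====
-- def partition_transitions(sequence, start_transitions):
--     seq = list(sequence)
--     starts = set(start_transitions)
--     n = len(seq)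
--     result = []
--     i = 0
--     while i < n:
--         j = i + 1
--         while j < n and seq[j] not in starts:
--             j += 1
--         result.append(seq[i:j])
--         i = j
--     return result
-- ===== Notes on version B (the rewrite author's own statement) =====
-- stated objective: alternative
-- what changed: Replaces A's single pass with a running current_partition accumulator and O(len(start_transitions)) list-membership tests by a two-pointer scan over a set of cut markers that finds each partition's end index and emits the partition as one slice.
import Mathlib
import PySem

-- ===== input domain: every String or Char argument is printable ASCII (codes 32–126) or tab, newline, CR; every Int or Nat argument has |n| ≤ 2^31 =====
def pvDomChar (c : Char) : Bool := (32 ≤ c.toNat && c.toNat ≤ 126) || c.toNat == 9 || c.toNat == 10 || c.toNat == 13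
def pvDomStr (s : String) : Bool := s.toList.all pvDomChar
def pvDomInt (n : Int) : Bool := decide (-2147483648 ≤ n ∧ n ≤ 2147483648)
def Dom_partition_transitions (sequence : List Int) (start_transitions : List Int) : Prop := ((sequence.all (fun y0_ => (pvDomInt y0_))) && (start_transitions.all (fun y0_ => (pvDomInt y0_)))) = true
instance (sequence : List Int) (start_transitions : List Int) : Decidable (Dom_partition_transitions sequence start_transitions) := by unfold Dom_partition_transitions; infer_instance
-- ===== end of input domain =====

-- B replaces A's running-accumulator scan by a two-pointer cut-finder that emits whole slices (objective: alternative decomposition).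

-- ===== PORT A =====
-- for-loop with state (partitions, current_partition); final flush of current_partition
def partition_transitions (sequence : List Int) (start_transitions : List Int) : List (List Int) :=
  let st := sequence.foldl
    (fun (s : List (List Int) × List Int) t =>
      if t ∈ start_transitions ∧ s.2 ≠ [] then (s.1 ++ [s.2], [t]) else (s.1, s.2 ++ [t]))
    ([], [])
  if st.2 ≠ [] then st.1 ++ [st.2] else st.1

-- ===== PORT B =====
-- inner while: advance j while j < n and seq[j] not in starts
-- (j is always in [0, n), so List.getD is exact for Python's seq[j] here)
def pvFindEnd (seq : List Int) (starts : PySem.Set Int) (n : Nat) (j : Nat) : Nat :=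
  if h : j < n ∧ !starts.contains (seq.getD j 0) = true then pvFindEnd seq starts n (j + 1) else j
termination_by n - j
decreasing_by omega

-- the inner while only moves j forward (needed for the outer loop's termination)
theorem pvFindEnd_ge (seq : List Int) (starts : PySem.Set Int) (n : Nat) :
    ∀ j, j ≤ pvFindEnd seq starts n j := by
  intro j
  fun_induction pvFindEnd seq starts n j with
  | case1 j h ih => omega
  | case2 j h => omega

-- outer while: result.append(seq[i:j]); i = j
def pvBuild (seq : List Int) (starts : PySem.Set Int) (n : Nat) (i : Nat) : List (List Int) :=
  if h : i < n then
    let j := pvFindEnd seq starts n (i + 1)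
    PySem.List.slice seq (some (i : Int)) (some (j : Int)) :: pvBuild seq starts n j
  else []
termination_by n - i
decreasing_by
  have := pvFindEnd_ge seq starts n (i + 1)
  omega

def partition_transitions_alt (sequence : List Int) (start_transitions : List Int) : List (List Int) :=
  pvBuild sequence (PySem.Set.ofList start_transitions) sequence.length 0

-- ===== PRECONDITION & SPEC =====
def Spec_partition_transitions (sequence : List Int) (start_transitions : List Int) (out : List (List Int)) : Prop := out = partition_transitions_alt sequence start_transitions
instance (sequence : List Int) (start_transitions : List Int) (out : List (List Int)) : Decidable (Spec_partition_transitions sequence start_transitions out) := by unfold Spec_partition_transitions; infer_instance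

-- ===== CLAIM (what is proved, stated in full; the proofs are below) =====
def Claim_equal_partition_transitions : Prop := ∀ (sequence : List Int) (start_transitions : List Int), Dom_partition_transitions sequence start_transitions → Spec_partition_transitions sequence start_transitions (partition_transitions sequence start_transitions)

-- ===== LEMMAS AND PROOFS =====

-- A's final flush (proof helper; definitionally the tail of port A)
def pvFin (st : List (List Int) × List Int) : List (List Int) :=
  if st.2 ≠ [] then st.1 ++ [st.2] else st.1

-- common characterisation: the list of maximal chunks, each starting at a cut point
def pvChunks (p : Int → Bool) : List Int → List (List Int)
  | [] => []
  | x :: r => (x :: r.takeWhile p) :: pvChunks p (r.dropWhile p)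
termination_by l => l.length
decreasing_by
  have := List.length_dropWhile_le p r
  simp
  omega

theorem pvChunks_nil (p : Int → Bool) : pvChunks p [] = [] := by
  rw [pvChunks]

theorem pvChunks_cons (p : Int → Bool) (x : Int) (r : List Int) :
    pvChunks p (x :: r) = (x :: r.takeWhile p) :: pvChunks p (r.dropWhile p) := by
  rw [pvChunks]

theorem pvFindEnd_eq (seq : List Int) (starts : PySem.Set Int) :
    ∀ j, pvFindEnd seq starts seq.length j
      = j + ((seq.drop j).takeWhile (fun t => !starts.contains t)).length := by
  intro j
  fun_induction pvFindEnd seq starts seq.length j with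
  | case1 j h ih =>
    obtain ⟨hj, hc⟩ := h
    have hdrop : seq.drop j = seq[j] :: seq.drop (j + 1) := by
      rw [List.getElem_cons_drop]
    have hget : seq.getD j 0 = seq[j] := List.getD_eq_getElem seq 0 hj
    rw [hget] at hc
    have hc' : starts.contains seq[j] = false := by simpa using hc
    rw [ih, hdrop, List.takeWhile_cons, hc']
    simp
    omega
  | case2 j h =>
    by_cases hj : j < seq.length
    · have hget : seq.getD j 0 = seq[j] := List.getD_eq_getElem seq 0 hj
      have hdrop : seq.drop j = seq[j] :: seq.drop (j + 1) := by
        rw [List.getElem_cons_drop]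
      cases hcb : starts.contains seq[j] with
      | false => exact absurd ⟨hj, by rw [hget, hcb]; decide⟩ h
      | true =>
        rw [hdrop, List.takeWhile_cons, hcb]
        simp
    · have : seq.drop j = [] := List.drop_eq_nil_of_le (by omega)
      simp [this]

theorem pvBuild_eq (seq : List Int) (starts : PySem.Set Int) :
    ∀ i, pvBuild seq starts seq.length i
      = pvChunks (fun t => !starts.contains t) (seq.drop i) := by
  intro i
  fun_induction pvBuild seq starts seq.length i with
  | case1 i h j ih =>
    have hdrop : seq.drop i = seq[i] :: seq.drop (i + 1) := by
      rw [List.getElem_cons_drop]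
    set p : Int → Bool := fun t => !starts.contains t with hp
    set tw := (seq.drop (i + 1)).takeWhile p with htw
    have hj : j = (i + 1) + tw.length := pvFindEnd_eq seq starts (i + 1)
    have hcast : (((i + 1) + tw.length : Nat) : Int)
        = ((i : Nat) : Int) + ((1 + tw.length : Nat) : Int) := by push_cast; ring
    have hpref : tw = (seq.drop (i + 1)).take tw.length :=
      List.prefix_iff_eq_take.mp (htw ▸ List.takeWhile_prefix p)
    have hslice : PySem.List.slice seq (some (i : Int)) (some (j : Int)) = seq[i] :: tw := by
      rw [hj, hcast, PySem.List.slice_natCast_add, hdrop,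
          Nat.add_comm 1 tw.length, List.take_succ_cons, ← hpref]
    have hdd : (seq.drop (i + 1)).drop tw.length = seq.drop j := by
      rw [List.drop_drop, hj]
    have hdropj : seq.drop j = (seq.drop (i + 1)).dropWhile p := by
      rw [← hdd]
      conv_lhs => rw [← List.takeWhile_append_dropWhile (p := p) (l := seq.drop (i + 1)), ← htw,
        List.drop_left]
    rw [ih, hslice, hdropj, hdrop, pvChunks_cons]
  | case2 i h =>
    have : seq.drop i = [] := List.drop_eq_nil_of_le (by omega)
    rw [this, pvChunks_nil]

-- A's loop from a non-empty current partition: it extends the partition with the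
-- maximal run of non-cuts, then produces the chunks of the rest
theorem pvA_go (start_transitions : List Int) :
    ∀ (l : List Int) (parts : List (List Int)) (cur : List Int), cur ≠ [] →
      pvFin (l.foldl
        (fun (s : List (List Int) × List Int) t =>
          if t ∈ start_transitions ∧ s.2 ≠ [] then (s.1 ++ [s.2], [t]) else (s.1, s.2 ++ [t]))
        (parts, cur))
      = parts ++ (cur ++ l.takeWhile (fun t => !decide (t ∈ start_transitions)))
          :: pvChunks (fun t => !decide (t ∈ start_transitions))
               (l.dropWhile (fun t => !decide (t ∈ start_transitions))) := by
  intro l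
  induction l with
  | nil =>
    intro parts cur hcur
    simp [pvFin, pvChunks_nil, hcur]
  | cons t r ih =>
    intro parts cur hcur
    by_cases ht : t ∈ start_transitions
    · rw [List.foldl_cons, if_pos (show t ∈ start_transitions ∧ cur ≠ [] from ⟨ht, hcur⟩),
          ih (parts ++ [cur]) [t] (by simp)]
      simp [ht, pvChunks_cons]
    · rw [List.foldl_cons, if_neg (by tauto),
          ih parts (cur ++ [t]) (by simp)]
      simp [ht]

theorem pvPred_eq (start_transitions : List Int) :
    (fun t => !(PySem.Set.ofList start_transitions).contains t)
      = (fun t : Int => !decide (t ∈ start_transitions)) := by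
  funext t
  have h1 : ((PySem.Set.ofList start_transitions).contains t = true) ↔ (decide (t ∈ start_transitions) = true) := by
    simp [PySem.Set.mem_ofList]
  rw [Bool.eq_iff_iff.mpr h1]

-- ===== VERDICT (by name: the statement is the Claim_ definition above) =====
theorem partition_transitions_spec : Claim_equal_partition_transitions := by
  intro sequence start_transitions _
  unfold Spec_partition_transitions partition_transitions_alt
  rw [pvBuild_eq sequence (PySem.Set.ofList start_transitions) 0, List.drop_zero, pvPred_eq]
  show pvFin (sequence.foldl _ ([], [])) = _
  cases sequence with
  | nil => simp [pvFin, pvChunks_nil]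
  | cons x r =>
    rw [List.foldl_cons, if_neg (by simp)]
    show pvFin (List.foldl _ ([], [x]) r)
      = pvChunks (fun t => !decide (t ∈ start_transitions)) (x :: r)
    rw [pvA_go start_transitions r [] [x] (by simp), pvChunks_cons]
    simp
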